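-- pv_equiv track=rewrite | github.com/ChocoCodes/face-detection-g3 | main.py | bool_flag
-- ===== SOURCE A (Python) =====
-- def bool_flag(args: list[str], name: str, default: bool) -> bool:
--     positive = f"--{name}"
--     negative = f"--no-{name}"
--     if any(arg == negative or arg.startswith(f"{negative}=") for arg in args):
--         return False
--     if any(arg == positive or arg.startswith(f"{positive}=") for arg in args):
--         return True
--     return default
-- ===== SOURCE B (Python) =====
-- def bool_flag(args: list[str], name: str, default: bool) -> bool:
--     positive = f"--{name}"
--     negative = f"--no-{name}"
--     seen_positive = False
--     for arg in args:
--         if arg == negative or arg.startswith(negative + "="):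
--             return False
--         if arg == positive or arg.startswith(positive + "="):
--             seen_positive = True
--     return True if seen_positive else default
-- ===== Notes on version B (the rewrite author's own statement) =====
-- stated objective: alternative
-- what changed: Replaced A's two sequential any() scans over args with a single loop that returns False immediately on a negative match and accumulates seen_positive, preserving negative-beats-positive precedence.
import Mathlib
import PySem

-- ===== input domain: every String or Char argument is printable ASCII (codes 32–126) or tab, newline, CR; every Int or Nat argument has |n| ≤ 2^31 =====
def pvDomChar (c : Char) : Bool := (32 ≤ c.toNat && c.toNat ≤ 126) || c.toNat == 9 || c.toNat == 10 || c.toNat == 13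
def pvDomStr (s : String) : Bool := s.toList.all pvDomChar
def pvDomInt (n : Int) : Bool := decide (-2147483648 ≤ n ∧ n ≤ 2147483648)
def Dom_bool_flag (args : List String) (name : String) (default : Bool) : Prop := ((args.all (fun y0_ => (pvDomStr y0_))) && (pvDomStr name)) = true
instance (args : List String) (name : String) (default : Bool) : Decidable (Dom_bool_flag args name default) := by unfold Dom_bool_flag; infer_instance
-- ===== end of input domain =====

-- B replaces A's two sequential any() scans with one loop keeping a seen_positive accumulator
-- and an early False on a negative match (objective: alternative decomposition, same cost).

-- ===== PORT A =====
def bool_flag (args : List String) (name : String) (default : Bool) : Bool :=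
  let positive := "--" ++ name
  let negative := "--no-" ++ name
  if args.any (fun arg => arg == negative || PySem.Str.startswith arg (negative ++ "=")) then
    false
  else if args.any (fun arg => arg == positive || PySem.Str.startswith arg (positive ++ "=")) then
    true
  else
    default

-- ===== PORT B =====
-- the for-loop of Source B: early return False on negative, accumulate seen_positive
def bool_flag_alt_loop (positive negative : String) (default : Bool) :
    List String → Bool → Bool
  | [], seen => if seen then true else default
  | arg :: rest, seen =>
    if arg == negative || PySem.Str.startswith arg (negative ++ "=") then
      false
    else if arg == positive || PySem.Str.startswith arg (positive ++ "=") then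
      bool_flag_alt_loop positive negative default rest true
    else
      bool_flag_alt_loop positive negative default rest seen

def bool_flag_alt (args : List String) (name : String) (default : Bool) : Bool :=
  let positive := "--" ++ name
  let negative := "--no-" ++ name
  bool_flag_alt_loop positive negative default args false

-- ===== PRECONDITION & SPEC =====
def Spec_bool_flag (args : List String) (name : String) (default : Bool) (out : Bool) : Prop := out = bool_flag_alt args name default
instance (args : List String) (name : String) (default : Bool) (out : Bool) : Decidable (Spec_bool_flag args name default out) := by unfold Spec_bool_flag; infer_instance

-- ===== CLAIM (what is proved, stated in full; the proofs are below) =====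
def Claim_equal_bool_flag : Prop := ∀ (args : List String) (name : String) (default : Bool), Dom_bool_flag args name default → Spec_bool_flag args name default (bool_flag args name default)

-- ===== LEMMAS AND PROOFS =====

theorem bool_flag_alt_loop_eq (positive negative : String) (default : Bool)
    (args : List String) (seen : Bool) :
    bool_flag_alt_loop positive negative default args seen =
      if args.any (fun arg => arg == negative || PySem.Str.startswith arg (negative ++ "=")) then
        false
      else if seen || args.any (fun arg => arg == positive || PySem.Str.startswith arg (positive ++ "=")) then
        true
      else
        default := by
  induction args generalizing seen with
  | nil => simp [bool_flag_alt_loop]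
  | cons a rest ih =>
    simp only [bool_flag_alt_loop, List.any_cons]
    cases hn : (a == negative || PySem.Str.startswith a (negative ++ "=")) with
    | true => simp
    | false =>
      rcases Bool.dichotomy (a == positive || PySem.Str.startswith a (positive ++ "=")) with hp | hp <;>
        simp at hp <;> simp [ih, hp] <;> cases seen <;> simp

-- ===== VERDICT (by name: the statement is the Claim_ definition above) =====
theorem bool_flag_spec : Claim_equal_bool_flag := by
  intro args name default _
  unfold Spec_bool_flag bool_flag bool_flag_alt
  rw [bool_flag_alt_loop_eq]
  simp
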